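-- pv_equiv track=rewrite | github.com/Janepoor/Python-Practice- | sample2.5.py | parse
-- ===== SOURCE A (Python) =====
-- def parse(str):
--     rels = dict()
--     for rel in str.split(','):
--         m,e = rel.split('->')
--         if m not in rels:
--             rels[m] = e
--         else:
--             rels[m] += ',' + e
--     return rels
-- ===== SOURCE B (Python) =====
-- def parse(str):
--     pairs = [tuple(rel.split('->')) for rel in str.split(',')]
--     pairs = [(m, e) for m, e in pairs]
--     keys = []
--     for m, _ in pairs:
--         if m not in keys:
--             keys.append(m)
--     return {m: ','.join(e for k, e in pairs if k == m) for m in keys}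
-- ===== Notes on version B (the rewrite author's own statement) =====
-- stated objective: alternative
-- what changed: B abandons the dict-accumulator single pass: it materialises the (key,value) pair list, computes the distinct keys in first-occurrence order, and then for each key re-scans the pair list, joining that key's values with ',' (a staged nested-scan group-by instead of A's one-pass dict with string growing).
import Mathlib
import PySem

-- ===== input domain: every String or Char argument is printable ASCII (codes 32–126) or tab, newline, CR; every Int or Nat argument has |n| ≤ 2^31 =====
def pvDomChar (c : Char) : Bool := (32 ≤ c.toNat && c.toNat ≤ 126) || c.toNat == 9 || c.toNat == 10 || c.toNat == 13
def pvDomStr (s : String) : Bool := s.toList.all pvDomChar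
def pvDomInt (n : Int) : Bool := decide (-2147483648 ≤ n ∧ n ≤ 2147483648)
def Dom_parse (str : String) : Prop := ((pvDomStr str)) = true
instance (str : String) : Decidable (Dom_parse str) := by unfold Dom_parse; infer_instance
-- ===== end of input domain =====

-- B replaces A's one-pass dict accumulation by a staged group-by: pair list, distinct keys in
-- first-occurrence order, then one scan of the pairs per key joining its values (alternative).

-- ===== PORT A =====
-- literal transliteration of A: one dict of strings, grown with ',' + e on repeat keys
def parse (str : String) : List (String × String) :=
  (((PySem.Str.split? str ",").getD []).foldl (fun rels rel =>
      match (PySem.Str.split? rel "->").getD [] with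
      | [m, e] =>
          if rels.contains m = false then rels.insert m e
          else rels.insert m (rels.getD m "" ++ "," ++ e)
      | _ => rels)   -- Python raises ValueError here (unpacking); excluded by Pre_parse
    PySem.Dict.empty).items

-- ===== PORT B =====
-- B-side helper: 'tuple(rel.split('->'))' unpacked as (m, e)
def pvPairOf (rel : String) : String × String :=
  let ps := (PySem.Str.split? rel "->").getD []
  (ps.getD 0 "", ps.getD 1 "")   -- in Python a non-2-part split raises ValueError; excluded by Pre_parse
-- literal transliteration of B: pair list, first-occurrence distinct keys, per-key filter+join
def parse_alt (str : String) : List (String × String) :=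
  let pairs := ((PySem.Str.split? str ",").getD []).map pvPairOf
  let keys := pairs.foldl (fun ks p => if p.1 ∈ ks then ks else ks ++ [p.1]) ([] : List String)
  keys.map (fun m => (m, PySem.Str.join "," ((pairs.filter (fun p => p.1 == m)).map (·.2))))

-- ===== PRECONDITION & SPEC =====
-- Pre_ excludes exactly the inputs where some comma-segment does not split on '->' into two
-- parts: there Python's 'm,e = rel.split(...)' raises ValueError (in A and in B alike).
def Pre_parse (str : String) : Prop :=
  ∀ rel ∈ (PySem.Str.split? str ",").getD [],
    ((PySem.Str.split? rel "->").getD []).length = 2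
instance (str : String) : Decidable (Pre_parse str) := by unfold Pre_parse; infer_instance
def pvWitness_parse : String := "a->b,c->d,a->e"
def Spec_parse (str : String) (out : List (String × String)) : Prop := out = parse_alt str
instance (str : String) (out : List (String × String)) : Decidable (Spec_parse str out) := by unfold Spec_parse; infer_instance

-- ===== CLAIM (what is proved, stated in full; the proofs are below) =====
def Claim_equal_parse : Prop := ∀ (str : String), Dom_parse str → Pre_parse str → Spec_parse str (parse str)

-- ===== LEMMAS AND PROOFS =====

-- joining one more piece onto a nonempty list of pieces appends "," + piece (List Char level)
theorem pvJoinSnocChars (l : List (List Char)) (hl : l ≠ []) (e : List Char) :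
    PySem.Chars.join [','] (l ++ [e]) = PySem.Chars.join [','] l ++ [','] ++ e := by
  induction l with
  | nil => simp at hl
  | cons a rest ih =>
    cases rest with
    | nil => simp [PySem.Chars.join_singleton, PySem.Chars.join_cons_cons]
    | cons b r =>
      have h := ih (by simp)
      simp only [List.cons_append] at h ⊢
      rw [PySem.Chars.join_cons_cons, PySem.Chars.join_cons_cons, h]
      simp

theorem pvOfListAppend (a b : List Char) :
    String.ofList (a ++ b) = String.ofList a ++ String.ofList b := by simp

theorem pvJoinSnoc (l : List String) (hl : l ≠ []) (e : String) :
    PySem.Str.join "," (l ++ [e]) = PySem.Str.join "," l ++ "," ++ e := by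
  have hmap : (l.map String.toList) ≠ [] := by simpa using hl
  simp only [PySem.Str.join, List.map_append, List.map_cons, List.map_nil]
  rw [show (",".toList : List Char) = [','] from rfl]
  rw [pvJoinSnocChars (l.map String.toList) hmap e.toList, pvOfListAppend, pvOfListAppend]
  simp

theorem pvJoinSingleton (e : String) : PySem.Str.join "," [e] = e := by
  simp [PySem.Str.join, PySem.Chars.join_singleton]

-- A's loop body on an already-split pair
def pvStepA (d : PySem.Dict String String) (p : String × String) : PySem.Dict String String :=
  if d.contains p.1 = false then d.insert p.1 p.2
  else d.insert p.1 (d.getD p.1 "" ++ "," ++ p.2)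

-- B's first-occurrence distinct-keys fold
def pvKeysOf (ps : List (String × String)) : List String :=
  ps.foldl (fun ks p => if p.1 ∈ ks then ks else ks ++ [p.1]) []

-- B's per-key value
def pvVal (ps : List (String × String)) (m : String) : String :=
  PySem.Str.join "," ((ps.filter (fun p => p.1 == m)).map (·.2))

theorem pvMemKeysFold (ps : List (String × String)) (ks : List String) (m : String) :
    m ∈ ps.foldl (fun ks p => if p.1 ∈ ks then ks else ks ++ [p.1]) ks ↔
      m ∈ ks ∨ m ∈ ps.map (·.1) := by
  induction ps generalizing ks with
  | nil => simp
  | cons p rest ih =>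
    simp only [List.foldl_cons, List.map_cons, List.mem_cons, ih]
    split_ifs with h
    · constructor
      · rintro (h1 | h1)
        · exact Or.inl h1
        · exact Or.inr (Or.inr h1)
      · rintro (h1 | h1 | h1)
        · exact Or.inl h1
        · exact Or.inl (h1 ▸ h)
        · exact Or.inr h1
    · simp only [List.mem_append, List.mem_singleton]
      tauto

theorem pvMemKeysOf (ps : List (String × String)) (m : String) :
    m ∈ pvKeysOf ps ↔ m ∈ ps.map (·.1) := by
  simpa using pvMemKeysFold ps [] m

theorem pvNodupKeysFold (ps : List (String × String)) (ks : List String) (h : ks.Nodup) :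
    (ps.foldl (fun ks p => if p.1 ∈ ks then ks else ks ++ [p.1]) ks).Nodup := by
  induction ps generalizing ks with
  | nil => exact h
  | cons p rest ih =>
    simp only [List.foldl_cons]
    split_ifs with hm
    · exact ih ks h
    · refine ih _ ((List.nodup_append).mpr ⟨h, List.nodup_singleton _, ?_⟩)
      intro a ha b hb
      simp only [List.mem_singleton] at hb
      exact fun h' => hm ((hb ▸ h') ▸ ha)

theorem pvNodupKeysOf (ps : List (String × String)) : (pvKeysOf ps).Nodup :=
  pvNodupKeysFold ps [] List.nodup_nil

theorem pvKeysOfSnoc (ps : List (String × String)) (p : String × String) :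
    pvKeysOf (ps ++ [p]) =
      if p.1 ∈ pvKeysOf ps then pvKeysOf ps else pvKeysOf ps ++ [p.1] := by
  simp [pvKeysOf, List.foldl_append]

-- the core: A's dict fold produces exactly B's (key, joined values) table
theorem pvDictLem (ps : List (String × String)) :
    (ps.foldl pvStepA PySem.Dict.empty).items =
      (pvKeysOf ps).map (fun m => (m, pvVal ps m)) := by
  induction ps using List.reverseRecOn with
  | nil => simp [pvKeysOf, PySem.Dict.empty]
  | append_singleton ps p ih =>
    obtain ⟨m, e⟩ := p
    have hfold : (ps ++ [(m, e)]).foldl pvStepA PySem.Dict.empty =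
        pvStepA (ps.foldl pvStepA PySem.Dict.empty) (m, e) := by
      simp [List.foldl_append]
    set D := ps.foldl pvStepA PySem.Dict.empty with hD
    have hkeysD : D.keys = pvKeysOf ps := by
      show D.items.map (·.1) = _
      rw [ih, List.map_map]
      exact List.map_id'' (fun x => rfl) _
    have hndD : D.keys.Nodup := by rw [hkeysD]; exact pvNodupKeysOf ps
    have hcont : D.contains m = decide (m ∈ pvKeysOf ps) := by
      rw [PySem.Dict.contains_eq_decide_mem_keys, hkeysD]
    rw [hfold, pvKeysOfSnoc]
    by_cases hmem : m ∈ pvKeysOf ps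
    · -- repeat key: A appends "," ++ e; B's filter gains one element at the end
      have hcontT : D.contains m = true := by simp [hcont, hmem]
      have hstep : pvStepA D (m, e) = D.insert m (D.getD m "" ++ "," ++ e) := by
        simp [pvStepA, hcontT]
      have hmemItems : (m, pvVal ps m) ∈ D.items := by
        rw [ih]; exact List.mem_map_of_mem hmem
      have hgetD : D.getD m "" = pvVal ps m := PySem.Dict.getD_of_mem_items _ hmemItems hndD _
      have hfilterne : (ps.filter (fun p => p.1 == m)).map (·.2) ≠ [] := by
        have : m ∈ ps.map (·.1) := (pvMemKeysOf ps m).mp hmem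
        obtain ⟨q, hq, hq1⟩ := List.mem_map.mp this
        intro hc
        have : q ∈ ps.filter (fun p => p.1 == m) :=
          List.mem_filter.mpr ⟨hq, by simp [hq1]⟩
        simp [List.map_eq_nil_iff.mp hc] at this
      rw [hstep, PySem.Dict.items_insert_of_contains _ _ hcontT, ih, List.map_map,
        if_pos hmem]
      refine List.map_congr_left (fun k hk => ?_)
      by_cases hkm : k = m
      · subst hkm
        simp only [Function.comp, beq_self_eq_true, if_pos]
        have : pvVal (ps ++ [(k, e)]) k = pvVal ps k ++ "," ++ e := by
          simp only [pvVal, List.filter_append, List.map_append]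
          rw [List.filter_singleton]
          simp only [beq_self_eq_true]
          exact pvJoinSnoc _ hfilterne e
        simp [this, hgetD]
      · have hbeq : (k == m) = false := by simp [hkm]
        simp only [Function.comp, hbeq, if_neg, Bool.false_eq_true, not_false_iff]
        have : pvVal (ps ++ [(m, e)]) k = pvVal ps k := by
          simp only [pvVal, List.filter_append]
          rw [List.filter_singleton]
          simp [show (m == k) = false by simp [Ne.symm hkm]]
        simp [this]
    · -- fresh key: A appends (m, e); B's key list gains m, whose only match is the new pair
      have hcontF : D.contains m = false := by simp [hcont, hmem]
      have hstep : pvStepA D (m, e) = D.insert m e := by simp [pvStepA, hcontF]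
      have hnotps : m ∉ ps.map (·.1) := fun h => hmem ((pvMemKeysOf ps m).mpr h)
      have hfilterm : ps.filter (fun p => p.1 == m) = [] := by
        rw [List.filter_eq_nil_iff]
        intro q hq
        simp only [beq_iff_eq]
        exact fun h => hnotps (List.mem_map.mpr ⟨q, hq, h⟩)
      rw [hstep, PySem.Dict.items_insert_of_not_contains _ _ hcontF, ih, if_neg hmem,
        List.map_append]
      congr 1
      · refine List.map_congr_left (fun k hk => ?_)
        have hkm : k ≠ m := fun h => hmem (h ▸ hk)
        have : pvVal (ps ++ [(m, e)]) k = pvVal ps k := by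
          simp only [pvVal, List.filter_append]
          rw [List.filter_singleton]
          simp [show (m == k) = false by simp [Ne.symm hkm]]
        simp [this]
      · have : pvVal (ps ++ [(m, e)]) m = e := by
          simp only [pvVal, List.filter_append, hfilterm]
          rw [List.filter_singleton]
          simp [pvJoinSingleton]
        simp [this]

-- ===== VERDICT (by name: the statement is the Claim_ definition above) =====
theorem parse_spec : Claim_equal_parse := by
  intro str _ hpre
  unfold Spec_parse parse parse_alt
  set segs := (PySem.Str.split? str ",").getD [] with hsegs
  have hbody : segs.foldl (fun rels rel =>
      match (PySem.Str.split? rel "->").getD [] with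
      | [m, e] =>
          if rels.contains m = false then rels.insert m e
          else rels.insert m (rels.getD m "" ++ "," ++ e)
      | _ => rels) PySem.Dict.empty = (segs.map pvPairOf).foldl pvStepA PySem.Dict.empty := by
    rw [List.foldl_map]
    refine PySem.List.foldl_congr_mem segs _ _ PySem.Dict.empty (fun d rel hrel => ?_)
    obtain ⟨m, e, hsp⟩ : ∃ m e, (PySem.Str.split? rel "->").getD [] = [m, e] := by
      have h2 := hpre rel hrel
      match h : (PySem.Str.split? rel "->").getD [] with
      | [m, e] => exact ⟨m, e, rfl⟩
      | [] => rw [h] at h2; simp at h2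
      | [_] => rw [h] at h2; simp at h2
      | _ :: _ :: _ :: _ => rw [h] at h2; simp at h2
    simp [hsp, pvPairOf, pvStepA]
  rw [hbody, pvDictLem]
  rfl
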